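-- pv_equiv track=rewrite | github.com/AbanteAI/LoCoDiff-bench | benchmark_pipeline/3_generate_pages.py | determine_prompt_quartiles
-- ===== SOURCE A (Python) =====
-- from typing import Dict, List, Any, Tuple, Set, Optional
--
-- def determine_prompt_quartiles(
--     prompt_tokens_list: List[int],
-- ) -> List[Tuple[int, int]]:
--     """
--     Determines the token count ranges for each quartile.
--
--     Args:
--         prompt_tokens_list: List of token counts for all prompts
--
--     Returns:
--         List of tuples (min_tokens, max_tokens) for each quartile
--     """
--     if not prompt_tokens_list:
--         return [(0, 0), (0, 0), (0, 0), (0, 0)]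
--
--     sorted_tokens = sorted(prompt_tokens_list)
--     total_count = len(sorted_tokens)
--
--     # Calculate quartile indices to ensure exact even split
--     # For 200 items, this would give us indices [0, 50, 100, 150, 200]
--     quartile_indices = []
--     for i in range(5):
--         idx = (i * total_count) // 4
--         # Cap at the last index to avoid out of bounds
--         idx = min(idx, total_count - 1) if i < 4 else total_count
--         quartile_indices.append(idx)
--
--     # Handle edge cases for small lists
--     if total_count < 4:
--         return [(sorted_tokens[0], sorted_tokens[-1])] * 4
--
--     # Create quartile ranges using the indices to get token values
--     # Important: The last index is total_count which is out of bounds, so -1 for the upper bound of Q4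
--     q1_range = (
--         sorted_tokens[quartile_indices[0]],
--         sorted_tokens[quartile_indices[1] - 1],
--     )
--     q2_range = (
--         sorted_tokens[quartile_indices[1]],
--         sorted_tokens[quartile_indices[2] - 1],
--     )
--     q3_range = (
--         sorted_tokens[quartile_indices[2]],
--         sorted_tokens[quartile_indices[3] - 1],
--     )
--     q4_range = (sorted_tokens[quartile_indices[3]], sorted_tokens[-1])
--
--     return [q1_range, q2_range, q3_range, q4_range]
-- ===== SOURCE B (Python) =====
-- from typing import List, Tuple
--
--
-- def determine_prompt_quartiles(
--     prompt_tokens_list: List[int],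
-- ) -> List[Tuple[int, int]]:
--     # Selection-based: the 8 needed order statistics are found by iterative
--     # quickselect (middle-element pivot, three-way partition); the list is
--     # never fully sorted.
--     if not prompt_tokens_list:
--         return [(0, 0)] * 4
--
--     def kth(xs, k):
--         # value at index k of sorted(xs), for 0 <= k < len(xs)
--         while True:
--             p = xs[len(xs) // 2]
--             lt = [x for x in xs if x < p]
--             if k < len(lt):
--                 xs = lt
--                 continue
--             eq = len([x for x in xs if x == p])
--             if k < len(lt) + eq:
--                 return p
--             k -= len(lt) + eq
--             xs = [x for x in xs if x > p]
--
--     L = prompt_tokens_list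
--     n = len(L)
--     if n < 4:
--         pr = (kth(L, 0), kth(L, n - 1))
--         return [pr] * 4
--     return [
--         (kth(L, 0), kth(L, n // 4 - 1)),
--         (kth(L, n // 4), kth(L, n // 2 - 1)),
--         (kth(L, n // 2), kth(L, 3 * n // 4 - 1)),
--         (kth(L, 3 * n // 4), kth(L, n - 1)),
--     ]
-- ===== Notes on version B (the rewrite author's own statement) =====
-- stated objective: alternative
-- what changed: B replaces the full sort with an iterative three-way-partition quickselect that extracts only the eight order statistics the quartile bounds need; the list is never sorted.
import Mathlib
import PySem

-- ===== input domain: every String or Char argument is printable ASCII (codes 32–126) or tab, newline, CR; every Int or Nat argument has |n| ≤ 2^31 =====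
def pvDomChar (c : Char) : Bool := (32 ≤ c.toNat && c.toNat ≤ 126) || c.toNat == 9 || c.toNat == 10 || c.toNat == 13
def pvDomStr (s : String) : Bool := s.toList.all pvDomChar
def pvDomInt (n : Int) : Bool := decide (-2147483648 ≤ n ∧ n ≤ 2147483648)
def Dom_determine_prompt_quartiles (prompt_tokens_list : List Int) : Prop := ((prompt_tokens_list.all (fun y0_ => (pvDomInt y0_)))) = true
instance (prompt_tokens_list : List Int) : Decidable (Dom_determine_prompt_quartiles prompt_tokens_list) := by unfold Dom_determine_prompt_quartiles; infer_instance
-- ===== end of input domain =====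

-- B computes the eight needed order statistics by quickselect instead of sorting; same return value, alternative algorithm.

-- ===== PORT A =====
def determine_prompt_quartiles (prompt_tokens_list : List Int) : List (Int × Int) :=
  if prompt_tokens_list = [] then [(0, 0), (0, 0), (0, 0), (0, 0)]
  else
    let sorted_tokens := PySem.List.sorted prompt_tokens_list (fun x => x) false
    let total_count : Int := prompt_tokens_list.length
    let quartile_indices : List Int := (PySem.List.pyRange 0 5 1).foldl (fun acc i =>
      let idx := PySem.Int.floordiv (i * total_count) 4
      let idx := if i < 4 then min idx (total_count - 1) else idx
      acc ++ [idx]) []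
    -- every index below is in range, so the `.getD 0` default is never taken
    let get : Int → Int := fun i => (PySem.List.pyGet? sorted_tokens i).getD 0
    let qi : Int → Int := fun j => (PySem.List.pyGet? quartile_indices j).getD 0
    if total_count < 4 then
      let pr := (get 0, get (-1))
      [pr, pr, pr, pr]
    else
      [ (get (qi 0), get (qi 1 - 1)),
        (get (qi 1), get (qi 2 - 1)),
        (get (qi 2), get (qi 3 - 1)),
        (get (qi 3), get (-1)) ]

-- ===== PORT B =====
-- quickselect (Source B's `kth` while-loop, as the obvious recursion; pivot = middle element)
def pvKth : List Int → Nat → Int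
  | [], _ => 0  -- unreachable when 0 ≤ k < length (Python's loop never sees an empty xs then)
  | p0 :: t, k =>
    let xs := p0 :: t
    let p := xs.getD (xs.length / 2) 0
    let lt := xs.filter (fun x => decide (x < p))
    if k < lt.length then pvKth lt k
    else
      let eqn := (xs.filter (fun x => decide (x = p))).length
      if k < lt.length + eqn then p
      else pvKth (xs.filter (fun x => decide (p < x))) (k - lt.length - eqn)
termination_by xs _ => xs.length
decreasing_by
  all_goals
    refine List.length_filter_lt_length_iff_exists.mpr
      ⟨(p0 :: t).getD ((p0 :: t).length / 2) 0, ?_, by simp⟩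
    rw [List.getD_eq_getElem]
    · exact List.getElem_mem _
    · simp
      omega

def determine_prompt_quartiles_alt (prompt_tokens_list : List Int) : List (Int × Int) :=
  if prompt_tokens_list = [] then [(0, 0), (0, 0), (0, 0), (0, 0)]
  else
    let L := prompt_tokens_list
    let n := L.length
    if n < 4 then
      let pr := (pvKth L 0, pvKth L (n - 1))
      [pr, pr, pr, pr]
    else
      [ (pvKth L 0, pvKth L (n / 4 - 1)),
        (pvKth L (n / 4), pvKth L (n / 2 - 1)),
        (pvKth L (n / 2), pvKth L (3 * n / 4 - 1)),
        (pvKth L (3 * n / 4), pvKth L (n - 1)) ]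

-- ===== PRECONDITION & SPEC =====
def Spec_determine_prompt_quartiles (prompt_tokens_list : List Int) (out : List (Int × Int)) : Prop := out = determine_prompt_quartiles_alt prompt_tokens_list
instance (prompt_tokens_list : List Int) (out : List (Int × Int)) : Decidable (Spec_determine_prompt_quartiles prompt_tokens_list out) := by unfold Spec_determine_prompt_quartiles; infer_instance

-- ===== CLAIM (what is proved, stated in full; the proofs are below) =====
def Claim_equal_determine_prompt_quartiles : Prop := ∀ (prompt_tokens_list : List Int), Dom_determine_prompt_quartiles prompt_tokens_list → Spec_determine_prompt_quartiles prompt_tokens_list (determine_prompt_quartiles prompt_tokens_list)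

-- ===== LEMMAS AND PROOFS =====

theorem pvSortedPartition (xs : List Int) (p : Int) :
    (PySem.List.sorted xs (fun x => x) false) =
      (PySem.List.sorted (xs.filter (fun x => decide (x < p))) (fun x => x) false)
      ++ xs.filter (fun x => decide (x = p))
      ++ (PySem.List.sorted (xs.filter (fun x => decide (p < x))) (fun x => x) false) := by
  apply PySem.List.sorted_id_eq_of_perm_of_pairwise
  · -- permutation
    have hA := PySem.List.sorted_perm (xs.filter (fun x => decide (x < p))) (fun x => x) false
    have hC := PySem.List.sorted_perm (xs.filter (fun x => decide (p < x))) (fun x => x) false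
    refine ((hA.append (List.Perm.refl _)).append hC).trans ?_
    have h1 := List.filter_append_perm (fun x => decide (x < p)) xs
    have h2 := List.filter_append_perm (fun x => decide (x = p))
      (xs.filter (fun x => !decide (x < p)))
    have hB : (xs.filter (fun x => !decide (x < p))).filter (fun x => decide (x = p))
        = xs.filter (fun x => decide (x = p)) := by
      rw [List.filter_filter]
      apply List.filter_congr
      intro x _
      by_cases hx : x = p <;> simp [hx]
    have hC' : (xs.filter (fun x => !decide (x < p))).filter (fun x => !decide (x = p))
        = xs.filter (fun x => decide (p < x)) := by
      rw [List.filter_filter]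
      apply List.filter_congr
      intro x _
      by_cases hx : p < x <;> simp [hx] <;> omega
    rw [List.append_assoc]
    refine (List.Perm.append_left _ ?_).trans h1
    rw [← hB, ← hC']
    exact h2
  · -- pairwise ≤
    rw [List.pairwise_append, List.pairwise_append]
    have memA : ∀ a ∈ PySem.List.sorted (xs.filter (fun x => decide (x < p))) (fun x => x) false, a < p := by
      intro a ha
      have := (PySem.List.mem_sorted _ _ _ _).mp ha
      simp [List.mem_filter] at this
      exact this.2
    have memB : ∀ b ∈ xs.filter (fun x => decide (x = p)), b = p := by
      intro b hb; simp [List.mem_filter] at hb; exact hb.2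
    have memC : ∀ c ∈ PySem.List.sorted (xs.filter (fun x => decide (p < x))) (fun x => x) false, p < c := by
      intro c hc
      have := (PySem.List.mem_sorted _ _ _ _).mp hc
      simp [List.mem_filter] at this
      exact this.2
    refine ⟨⟨PySem.List.sorted_pairwise _ _, List.pairwise_of_forall_mem_list ?_, ?_⟩,
      PySem.List.sorted_pairwise _ _, ?_⟩
    · intro a ha b hb; rw [memB a ha, memB b hb]
    · intro a ha b hb; have := memA a ha; have := memB b hb; omega
    · intro a ha c hc
      rcases List.mem_append.mp ha with h | h
      · have := memA a h; have := memC c hc; omega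
      · have := memB a h; have := memC c hc; omega

theorem pvLenSplit (xs : List Int) (p : Int) :
    (xs.filter (fun x => decide (x < p))).length + (xs.filter (fun x => decide (x = p))).length
      + (xs.filter (fun x => decide (p < x))).length = xs.length := by
  have h := congrArg List.length (pvSortedPartition xs p)
  simp [PySem.List.length_sorted] at h
  omega

theorem pvKth_eq_sorted_aux : ∀ (n : Nat) (xs : List Int) (k : Nat), xs.length ≤ n → k < xs.length →
    pvKth xs k = (PySem.List.sorted xs (fun x => x) false).getD k 0 := by
  intro n
  induction n with
  | zero => intro xs k h1 h2; omega
  | succ n ih =>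
    intro xs k h1 h2
    match xs with
    | [] => simp at h2
    | p0 :: t =>
      have hpm0 : (p0 :: t).getD ((p0 :: t).length / 2) 0 ∈ p0 :: t := by
        rw [List.getD_eq_getElem]
        · exact List.getElem_mem _
        · simp; omega
      simp only [pvKth]
      generalize hP : (p0 :: t).getD ((p0 :: t).length / 2) 0 = p at hpm0 ⊢
      have hsplit := pvLenSplit (p0 :: t) p
      have hAlt : (List.filter (fun x => decide (x < p)) (p0 :: t)).length < (p0 :: t).length :=
        List.length_filter_lt_length_iff_exists.mpr ⟨p, hpm0, by simp⟩
      have hClt : (List.filter (fun x => decide (p < x)) (p0 :: t)).length < (p0 :: t).length :=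
        List.length_filter_lt_length_iff_exists.mpr ⟨p, hpm0, by simp⟩
      simp only [List.length_cons] at h1 h2 hsplit hAlt hClt
      rw [pvSortedPartition (p0 :: t) p]
      by_cases h3 : k < (List.filter (fun x => decide (x < p)) (p0 :: t)).length
      · rw [if_pos h3, List.append_assoc,
          List.getD_append _ _ _ _ (by rw [PySem.List.length_sorted]; exact h3)]
        exact ih _ k (by omega) h3
      · rw [if_neg h3]
        by_cases h4 : k < (List.filter (fun x => decide (x < p)) (p0 :: t)).length
            + (List.filter (fun x => decide (x = p)) (p0 :: t)).length
        · rw [if_pos h4, List.append_assoc,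
            List.getD_append_right _ _ _ _ (by rw [PySem.List.length_sorted]; omega),
            PySem.List.length_sorted,
            List.getD_append _ _ _ _ (by omega)]
          rw [List.getD_eq_getElem _ _
            (by omega : k - (List.filter (fun x => decide (x < p)) (p0 :: t)).length
              < (List.filter (fun x => decide (x = p)) (p0 :: t)).length)]
          have hm := List.getElem_mem
            (l := List.filter (fun x => decide (x = p)) (p0 :: t))
            (n := k - (List.filter (fun x => decide (x < p)) (p0 :: t)).length) (by omega)
          simp only [List.mem_filter, decide_eq_true_eq] at hm
          exact hm.2.symm
        · rw [if_neg h4, List.append_assoc,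
            List.getD_append_right _ _ _ _ (by rw [PySem.List.length_sorted]; omega),
            PySem.List.length_sorted,
            List.getD_append_right _ _ _ _ (by omega)]
          exact ih _ _ (by omega) (by omega)

theorem pvKth_eq_sorted (xs : List Int) (k : Nat) (hk : k < xs.length) :
    pvKth xs k = (PySem.List.sorted xs (fun x => x) false).getD k 0 :=
  pvKth_eq_sorted_aux xs.length xs k (le_refl _) hk


theorem pvGet (xs : List Int) (i : Int) (k : Nat) (hik : i = (k : Int)) (hk : k < xs.length) :
    (PySem.List.pyGet? (PySem.List.sorted xs (fun x => x) false) i).getD 0 = pvKth xs k := by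
  subst hik
  rw [PySem.List.pyGet?_natCast, pvKth_eq_sorted xs k hk, List.getD_eq_getElem?_getD]

theorem pvGetNeg (xs : List Int) (h : xs ≠ []) :
    (PySem.List.pyGet? (PySem.List.sorted xs (fun x => x) false) (-1)).getD 0
      = pvKth xs (xs.length - 1) := by
  have h1 : 1 ≤ xs.length := List.length_pos_of_ne_nil h
  have hs : (PySem.List.sorted xs (fun x => x) false).length = xs.length :=
    PySem.List.length_sorted xs _ false
  have hidx : PySem.List.pyIdx? (PySem.List.sorted xs (fun x => x) false).length (-1)
      = some (xs.length - 1) := by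
    rw [hs]; simp [PySem.List.pyIdx?]; omega
  rw [pvKth_eq_sorted xs _ (by omega), List.getD_eq_getElem?_getD]
  rw [hs] at hidx
  simp [PySem.List.pyGet?, hidx]

-- ===== VERDICT (by name: the statement is the Claim_ definition above) =====
theorem determine_prompt_quartiles_spec : Claim_equal_determine_prompt_quartiles := by
  intro xs _
  unfold Spec_determine_prompt_quartiles
  by_cases hnil : xs = []
  · simp [determine_prompt_quartiles, determine_prompt_quartiles_alt, hnil]
  · simp only [determine_prompt_quartiles, determine_prompt_quartiles_alt, if_neg hnil]
    have hrange : PySem.List.pyRange 0 5 1 = [0, 1, 2, 3, 4] := by decide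
    rw [hrange]
    have hlen : 1 ≤ xs.length := List.length_pos_of_ne_nil hnil
    by_cases hsm : (xs.length : Int) < 4
    · rw [if_pos hsm, if_pos (by exact_mod_cast hsm : xs.length < 4)]
      rw [pvGetNeg xs hnil, pvGet xs 0 0 (by norm_num) (by omega)]
    · rw [if_neg hsm, if_neg (by omega : ¬ xs.length < 4)]
      have h4 : 4 ≤ xs.length := by omega
      have hfd : ∀ a : Int, PySem.Int.floordiv a 4 = a / 4 := by
        intro a; simp [PySem.Int.floordiv, Int.fdiv_eq_ediv]
      simp only [List.foldl_cons, List.foldl_nil, List.nil_append,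
        List.cons_append, List.nil_append, hfd]
      norm_num only
      simp only [if_true, if_false]
      have hg0 : ∀ (a b c d e : Int), (PySem.List.pyGet? [a, b, c, d, e] 0).getD 0 = a := by
        intro a b c d e; simp [PySem.List.pyGet?, PySem.List.pyIdx?]
      have hg1 : ∀ (a b c d e : Int), (PySem.List.pyGet? [a, b, c, d, e] 1).getD 0 = b := by
        intro a b c d e; simp [PySem.List.pyGet?, PySem.List.pyIdx?]
      have hg2 : ∀ (a b c d e : Int), (PySem.List.pyGet? [a, b, c, d, e] 2).getD 0 = c := by
        intro a b c d e; simp [PySem.List.pyGet?, PySem.List.pyIdx?]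
      have hg3 : ∀ (a b c d e : Int), (PySem.List.pyGet? [a, b, c, d, e] 3).getD 0 = d := by
        intro a b c d e; simp [PySem.List.pyGet?, PySem.List.pyIdx?]
      rw [hg0, hg1, hg2, hg3, pvGetNeg xs hnil,
        pvGet xs _ 0 (by omega) (by omega),
        pvGet xs _ (xs.length / 4 - 1) (by omega) (by omega),
        pvGet xs _ (xs.length / 4) (by omega) (by omega),
        pvGet xs _ (xs.length / 2 - 1) (by omega) (by omega),
        pvGet xs _ (xs.length / 2) (by omega) (by omega),
        pvGet xs _ (3 * xs.length / 4 - 1) (by omega) (by omega),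
        pvGet xs _ (3 * xs.length / 4) (by omega) (by omega)]
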